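-- pv_equiv track=rewrite | github.com/cminst/SimpleDeco | utils/request_diagnostics.py | _mask_to_segments
-- ===== SOURCE A (Python) =====
-- from typing import Any, List, Tuple
--
-- def _mask_to_segments(mask: List[bool]) -> List[Tuple[int, int]]:
--     """Group consecutive `True` entries into inclusive index segments."""
--     segments: List[Tuple[int, int]] = []
--     start = None
--     for idx, val in enumerate(mask):
--         if val and start is None:
--             start = idx
--         elif not val and start is not None:
--             segments.append((start, idx - 1))
--             start = None
--     if start is not None:
--         segments.append((start, len(mask) - 1))
--     return segments
-- ===== SOURCE B (Python) =====
-- from typing import List, Tuple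
--
-- def _mask_to_segments(mask: List[bool]) -> List[Tuple[int, int]]:
--     """Group consecutive `True` entries into inclusive index segments."""
--     n = len(mask)
--     starts = [i for i in range(n) if mask[i] and (i == 0 or not mask[i - 1])]
--     ends = [i for i in range(n) if mask[i] and (i == n - 1 or not mask[i + 1])]
--     return list(zip(starts, ends))
-- ===== Notes on version B (the rewrite author's own statement) =====
-- stated objective: alternative
-- what changed: B replaces the stateful start-sentinel scan by an edge-detection formulation: it collects the rising-edge indices (starts) and falling-edge indices (ends) with two stateless comprehensions and zips them into segments.
import Mathlib
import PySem

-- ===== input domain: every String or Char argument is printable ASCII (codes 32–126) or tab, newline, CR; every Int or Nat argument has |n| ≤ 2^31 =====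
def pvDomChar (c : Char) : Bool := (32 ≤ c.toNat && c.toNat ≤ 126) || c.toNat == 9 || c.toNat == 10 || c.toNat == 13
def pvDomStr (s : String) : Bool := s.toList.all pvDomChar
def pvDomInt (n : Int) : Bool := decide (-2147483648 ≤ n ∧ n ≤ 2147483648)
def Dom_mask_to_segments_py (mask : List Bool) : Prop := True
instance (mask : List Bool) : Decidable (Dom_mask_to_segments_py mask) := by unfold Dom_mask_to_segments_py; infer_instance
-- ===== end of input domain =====

-- B replaces A's stateful start-sentinel scan by edge detection: rising-edge
-- indices zipped with falling-edge indices (objective: alternative decomposition).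

-- ===== PORT A =====
-- the loop body of A's for-loop (branches in A's order)
def pvStepA (st : List (Int × Int) × Option Int) (p : Int × Bool) : List (Int × Int) × Option Int :=
  if p.2 && st.2.isNone then (st.1, some p.1)
  else if !p.2 && st.2.isSome then (st.1 ++ [(st.2.getD 0, p.1 - 1)], none)
  else st

def mask_to_segments_py (mask : List Bool) : List (Int × Int) :=
  let res := (PySem.List.enumerate mask 0).foldl pvStepA ([], none)
  match res.2 with
  | some s => res.1 ++ [(s, (mask.length : Int) - 1)]
  | none => res.1

-- ===== PORT B =====
def mask_to_segments_py_alt (mask : List Bool) : List (Int × Int) :=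
  let n : Int := mask.length
  let starts := (PySem.List.pyRange 0 n 1).filter (fun i =>
    PySem.List.pyGetD mask i false && (i == 0 || !(PySem.List.pyGetD mask (i - 1) false)))
  let ends := (PySem.List.pyRange 0 n 1).filter (fun i =>
    PySem.List.pyGetD mask i false && (i == n - 1 || !(PySem.List.pyGetD mask (i + 1) false)))
  starts.zip ends

-- ===== PRECONDITION & SPEC =====
def Spec_mask_to_segments_py (mask : List Bool) (out : List (Int × Int)) : Prop := out = mask_to_segments_py_alt mask
instance (mask : List Bool) (out : List (Int × Int)) : Decidable (Spec_mask_to_segments_py mask out) := by unfold Spec_mask_to_segments_py; infer_instance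

-- ===== CLAIM (what is proved, stated in full; the proofs are below) =====
def Claim_equal_mask_to_segments_py : Prop := ∀ (mask : List Bool), Dom_mask_to_segments_py mask → Spec_mask_to_segments_py mask (mask_to_segments_py mask)

-- ===== LEMMAS AND PROOFS =====

-- A's loop as a pure recursion (index, pending run start)
def foldA : List Bool → Int → Option Int → List (Int × Int)
  | [], _, none => []
  | [], i, some s => [(s, i - 1)]
  | true :: t, i, none => foldA t (i + 1) (some i)
  | true :: t, i, some s => foldA t (i + 1) (some s)
  | false :: t, i, none => foldA t (i + 1) none
  | false :: t, i, some s => (s, i - 1) :: foldA t (i + 1) none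

def headFalse : List Bool → Bool
  | [] => true
  | b :: _ => !b

-- rising edges of a suffix, given the previous element's value
def startsRec : Bool → Int → List Bool → List Int
  | _, _, [] => []
  | p, i, v :: t => (if v && !p then [i] else []) ++ startsRec v (i + 1) t

-- falling edges of a suffix (lookahead on the tail)
def endsRec : Int → List Bool → List Int
  | _, [] => []
  | i, v :: t => (if v && headFalse t then [i] else []) ++ endsRec (i + 1) t

theorem foldA_zip : ∀ (t : List Bool) (i : Int),
    foldA t i none = (startsRec false i t).zip (endsRec i t) ∧
    ∀ s, foldA t i (some s) =
      ((s :: startsRec true i t).zip ((if headFalse t then [i - 1] else []) ++ endsRec i t)) := by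
  intro t
  induction t with
  | nil => intro i; exact ⟨rfl, fun s => rfl⟩
  | cons v t ih =>
    intro i
    cases v
    · refine ⟨?_, ?_⟩
      · simp only [foldA, startsRec, endsRec, headFalse]
        simp [(ih (i + 1)).1]
      · intro s
        simp only [foldA, startsRec, endsRec, headFalse]
        simp [(ih (i + 1)).1, List.zip]
    · refine ⟨?_, ?_⟩
      · simp only [foldA, startsRec, endsRec, headFalse]
        have h := (ih (i + 1)).2 i
        simpa using h
      · intro s
        simp only [foldA, startsRec, endsRec, headFalse]
        have h := (ih (i + 1)).2 s
        simpa using h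

-- A's post-loop flush
def postA (res : List (Int × Int) × Option Int) (e : Int) : List (Int × Int) :=
  match res.2 with
  | some s => res.1 ++ [(s, e)]
  | none => res.1

theorem A_fold : ∀ (t : List Bool) (i : Int) (acc : List (Int × Int)) (st : Option Int),
    postA ((PySem.List.enumerate t i).foldl pvStepA (acc, st)) (i + t.length - 1)
      = acc ++ foldA t i st := by
  intro t
  induction t with
  | nil =>
    intro i acc st
    cases st with
    | none => simp [PySem.List.enumerate_nil, postA, foldA]
    | some s => simp [PySem.List.enumerate_nil, postA, foldA]
  | cons v t ih =>
    intro i acc st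
    rw [PySem.List.enumerate_cons, List.foldl_cons]
    have hl : (i + ((v :: t).length : Int) - 1) = (i + 1) + (t.length : Int) - 1 := by
      simp; ring
    rw [hl]
    cases v with
    | false =>
      cases st with
      | none =>
        have hstep : pvStepA (acc, none) (i, false) = (acc, none) := by simp [pvStepA]
        rw [hstep, ih (i + 1) acc none]
        simp [foldA]
      | some s =>
        have hstep : pvStepA (acc, some s) (i, false) = (acc ++ [(s, i - 1)], none) := by
          simp [pvStepA]
        rw [hstep, ih (i + 1) (acc ++ [(s, i - 1)]) none]
        simp [foldA]
    | true =>
      cases st with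
      | none =>
        have hstep : pvStepA (acc, none) (i, true) = (acc, some i) := by simp [pvStepA]
        rw [hstep, ih (i + 1) acc (some i)]
        simp [foldA]
      | some s =>
        have hstep : pvStepA (acc, some s) (i, true) = (acc, some s) := by simp [pvStepA]
        rw [hstep, ih (i + 1) acc (some s)]
        simp [foldA]

theorem A_eq_foldA (mask : List Bool) :
    mask_to_segments_py mask = foldA mask 0 none := by
  have h2 : mask_to_segments_py mask
      = postA ((PySem.List.enumerate mask 0).foldl pvStepA ([], none)) ((mask.length : Int) - 1) := rfl
  rw [h2]
  have h := A_fold mask 0 [] none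
  simpa using h

-- B's starts filter equals startsRec on the suffix (fuel k = n - a)
theorem B_starts : ∀ (mask : List Bool) (k a : Nat), k = mask.length - a →
    (PySem.List.pyRange a mask.length 1).filter (fun i =>
       PySem.List.pyGetD mask i false && (i == 0 || !(PySem.List.pyGetD mask (i - 1) false)))
    = startsRec (!(a == 0) && mask.getD (a - 1) false) a (mask.drop a) := by
  intro mask k
  induction k with
  | zero =>
    intro a ha
    have hle : mask.length ≤ a := by omega
    rw [PySem.List.pyRange_one_eq_nil (by exact_mod_cast hle), List.drop_eq_nil_of_le hle]
    rfl
  | succ k ih =>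
    intro a ha
    by_cases hlt : a < mask.length
    · have hget : PySem.List.pyGetD mask (a : Int) false = mask[a] := by
        rw [show ((a : Int)) = ((a : Nat) : Int) from rfl, PySem.List.pyGetD_natCast]
        simp [List.getD, hlt]
      have hprev : ((a : Int) == 0 || !(PySem.List.pyGetD mask ((a : Int) - 1) false))
          = !(!(a == 0) && mask.getD (a - 1) false) := by
        by_cases h0 : a = 0
        · subst h0; simp
        · have h1 : 1 ≤ a := by omega
          have hc : ((a : Int) - 1) = ((a - 1 : Nat) : Int) := by push_cast [h1]; ring
          have hA : ((a : Int) == 0) = false := by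
            rw [beq_eq_false_iff_ne]; exact_mod_cast h0
          have hN : (a == 0) = false := by rw [beq_eq_false_iff_ne]; exact h0
          rw [hc, PySem.List.pyGetD_natCast, hA, hN]
          simp
      have hp1 : (!((a + 1) == 0) && mask.getD (a + 1 - 1) false) = mask[a] := by
        simp [List.getD, List.getElem?_eq_getElem hlt]
      have hstep : ((a : Int) + 1) = ((a + 1 : Nat) : Int) := by push_cast; ring
      rw [PySem.List.pyRange_one_cons (by exact_mod_cast hlt), List.drop_eq_getElem_cons hlt]
      simp only [List.filter_cons, startsRec]
      rw [hget, hprev, hstep, ih (a + 1) (by omega), hp1]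
      split_ifs <;> simp
    · have hle : mask.length ≤ a := by omega
      rw [PySem.List.pyRange_one_eq_nil (by exact_mod_cast hle), List.drop_eq_nil_of_le hle]
      rfl

-- B's ends filter equals endsRec on the suffix
theorem B_ends : ∀ (mask : List Bool) (k a : Nat), k = mask.length - a →
    (PySem.List.pyRange a mask.length 1).filter (fun i =>
       PySem.List.pyGetD mask i false && (i == (mask.length : Int) - 1 || !(PySem.List.pyGetD mask (i + 1) false)))
    = endsRec a (mask.drop a) := by
  intro mask k
  induction k with
  | zero =>
    intro a ha
    have hle : mask.length ≤ a := by omega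
    rw [PySem.List.pyRange_one_eq_nil (by exact_mod_cast hle), List.drop_eq_nil_of_le hle]
    rfl
  | succ k ih =>
    intro a ha
    by_cases hlt : a < mask.length
    · have hget : PySem.List.pyGetD mask (a : Int) false = mask[a] := by
        rw [show ((a : Int)) = ((a : Nat) : Int) from rfl, PySem.List.pyGetD_natCast]
        simp [List.getD, hlt]
      have hstep : ((a : Int) + 1) = ((a + 1 : Nat) : Int) := by push_cast; ring
      have hnext : ((a : Int) == (mask.length : Int) - 1 || !(PySem.List.pyGetD mask ((a : Int) + 1) false))
          = headFalse (mask.drop (a + 1)) := by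
        by_cases hlast : a + 1 < mask.length
        · have hne : ((a : Int) == (mask.length : Int) - 1) = false := by
            rw [beq_eq_false_iff_ne]; intro h; omega
          rw [List.drop_eq_getElem_cons hlast, hstep, PySem.List.pyGetD_natCast, hne]
          simp [headFalse, List.getD, List.getElem?_eq_getElem hlast]
        · have heq : ((a : Int)) = (mask.length : Int) - 1 := by omega
          have hd : mask.drop (a + 1) = [] := List.drop_eq_nil_of_le (by omega)
          rw [hd, heq]
          simp [headFalse]
      rw [PySem.List.pyRange_one_cons (by exact_mod_cast hlt), List.drop_eq_getElem_cons hlt]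
      simp only [List.filter_cons, endsRec]
      rw [hget, hnext, hstep, ih (a + 1) (by omega)]
      split_ifs <;> simp
    · have hle : mask.length ≤ a := by omega
      rw [PySem.List.pyRange_one_eq_nil (by exact_mod_cast hle), List.drop_eq_nil_of_le hle]
      rfl

theorem B_eq (mask : List Bool) :
    mask_to_segments_py_alt mask = (startsRec false 0 mask).zip (endsRec 0 mask) := by
  simp only [mask_to_segments_py_alt]
  have hs := B_starts mask mask.length 0 (by omega)
  have he := B_ends mask mask.length 0 (by omega)
  simp only [Nat.cast_zero, List.drop_zero] at hs he
  rw [hs, he]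
  simp

-- ===== VERDICT (by name: the statement is the Claim_ definition above) =====
theorem mask_to_segments_py_spec : Claim_equal_mask_to_segments_py := by
  intro mask _
  show mask_to_segments_py mask = mask_to_segments_py_alt mask
  rw [A_eq_foldA, B_eq, (foldA_zip mask 0).1]
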